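-- pv_equiv track=rewrite | github.com/yotam-gafni/efx_chores | efx_chores/really_limit_sample.py | pareto_dominates
-- ===== SOURCE A (Python) =====
-- def pareto_dominates(new_val, old_val):
-- 	failed = False
-- 	reallyGained = False
-- 	for player in range(players):
-- 		if new_val[player] < old_val[player]:
-- 			failed = True
-- 		elif new_val[player] > old_val[player]:
-- 			reallyGained = True
--
-- 	return reallyGained and not failed
--
-- players = 3
-- ===== SOURCE B (Python) =====
-- players = 3
--
-- def pareto_dominates(new_val, old_val):
--     diffs = [new_val[p] - old_val[p] for p in range(players)]
--     return min(diffs) >= 0 and max(diffs) > 0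
-- ===== Notes on version B (the rewrite author's own statement) =====
-- stated objective: alternative
-- what changed: Instead of scanning coordinates and maintaining worse/better flags, B materialises the coordinatewise difference vector and decides domination arithmetically by its extrema: min(diffs) >= 0 and max(diffs) > 0.
import Mathlib
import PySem

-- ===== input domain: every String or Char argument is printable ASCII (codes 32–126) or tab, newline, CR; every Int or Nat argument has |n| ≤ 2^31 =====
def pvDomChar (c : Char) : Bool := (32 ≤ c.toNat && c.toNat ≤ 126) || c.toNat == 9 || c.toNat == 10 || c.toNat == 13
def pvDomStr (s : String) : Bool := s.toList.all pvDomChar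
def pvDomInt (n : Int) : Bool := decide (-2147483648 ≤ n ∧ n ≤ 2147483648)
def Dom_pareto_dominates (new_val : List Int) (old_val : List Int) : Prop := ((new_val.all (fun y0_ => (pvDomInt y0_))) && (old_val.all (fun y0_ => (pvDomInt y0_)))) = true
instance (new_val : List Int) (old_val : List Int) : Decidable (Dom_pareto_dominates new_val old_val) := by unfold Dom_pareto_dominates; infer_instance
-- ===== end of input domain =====

-- B replaces A's fused flag-maintaining loop with an arithmetic criterion on the difference vector: min(diffs) >= 0 and max(diffs) > 0 (alternative, same cost).
-- ===== PORT A =====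
def pareto_dominates (new_val : List Int) (old_val : List Int) : Bool :=
  let st := (PySem.List.pyRange 0 3 1).foldl (fun (s : Bool × Bool) player =>
    match PySem.List.pyGet? new_val player, PySem.List.pyGet? old_val player with
    | some a, some b =>
        if a < b then (true, s.2)
        else if a > b then (s.1, true)
        else s
    | _, _ => s)   -- unreachable under Pre_ (Python raises IndexError here)
    (false, false)
  st.2 && !st.1

-- ===== PORT B =====
def pareto_dominates_alt (new_val : List Int) (old_val : List Int) : Bool :=
  let diffs := (PySem.List.pyRange 0 3 1).map fun p =>
    (PySem.List.pyGet? new_val p).getD 0 - (PySem.List.pyGet? old_val p).getD 0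
  ((PySem.List.min? diffs (fun x => x)).bind fun m =>
    (PySem.List.max? diffs (fun x => x)).map fun M =>
      decide (0 ≤ m) && decide (0 < M)).getD false   -- the 'false' default is unreachable: diffs is nonempty (players = 3)

-- ===== PRECONDITION & SPEC =====
-- Pre_ excludes lists with fewer than 3 elements, on which Python A raises IndexError (players = 3).
def Pre_pareto_dominates (new_val : List Int) (old_val : List Int) : Prop :=
  3 ≤ new_val.length ∧ 3 ≤ old_val.length
instance (new_val : List Int) (old_val : List Int) : Decidable (Pre_pareto_dominates new_val old_val) := by unfold Pre_pareto_dominates; infer_instance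
def pvWitness_pareto_dominates : List Int × List Int := ([1, 2, 3], [1, 2, 2])

def Spec_pareto_dominates (new_val : List Int) (old_val : List Int) (out : Bool) : Prop := out = pareto_dominates_alt new_val old_val
instance (new_val : List Int) (old_val : List Int) (out : Bool) : Decidable (Spec_pareto_dominates new_val old_val out) := by unfold Spec_pareto_dominates; infer_instance

-- ===== CLAIM (what is proved, stated in full; the proofs are below) =====
def Claim_equal_pareto_dominates : Prop := ∀ (new_val : List Int) (old_val : List Int), Dom_pareto_dominates new_val old_val → Pre_pareto_dominates new_val old_val → Spec_pareto_dominates new_val old_val (pareto_dominates new_val old_val)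

-- ===== LEMMAS AND PROOFS =====

-- ===== VERDICT (by name: the statement is the Claim_ definition above) =====
theorem pareto_dominates_spec : Claim_equal_pareto_dominates := by
  intro nv ov _ hpre
  obtain ⟨h1, h2⟩ := hpre
  match nv, ov with
  | a0 :: a1 :: a2 :: ta, b0 :: b1 :: b2 :: tb =>
    have hr : PySem.List.pyRange 0 3 1 = [0, 1, 2] := by decide
    have g0 : ∀ (x y z : Int) (t : List Int), PySem.List.pyGet? (x :: y :: z :: t) 0 = some x := by
      intro x y z t
      simp only [PySem.List.pyGet?, PySem.List.pyIdx?, List.length_cons]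
      split_ifs <;> simp_all <;> omega
    have g1 : ∀ (x y z : Int) (t : List Int), PySem.List.pyGet? (x :: y :: z :: t) 1 = some y := by
      intro x y z t
      simp only [PySem.List.pyGet?, PySem.List.pyIdx?, List.length_cons]
      split_ifs <;> simp_all <;> omega
    have g2 : ∀ (x y z : Int) (t : List Int), PySem.List.pyGet? (x :: y :: z :: t) 2 = some z := by
      intro x y z t
      simp only [PySem.List.pyGet?, PySem.List.pyIdx?, List.length_cons]
      split_ifs <;> simp_all <;> omega
    unfold Spec_pareto_dominates pareto_dominates pareto_dominates_alt
    rw [hr]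
    simp only [List.foldl, List.map, g0, g1, g2, Option.getD_some,
               PySem.List.min?_id_cons, PySem.List.max?_id_cons,
               Option.bind_some, Option.map_some, Option.getD_some]
    clear hr g0 g1 g2 h1 h2
    split_ifs <;> simp <;> omega
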